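-- pv_equiv track=rewrite | github.com/Brunopezman/Algoritmos-y-Programacion-I | Ejercicios guia/6. Cadenas de caracteres/6.2_6.3.py | separar_por_caracter
-- ===== SOURCE A (Python) =====
-- def separar_por_caracter(cadena, caracter, cantidad_reemplazos):
--
--     nueva_cadena = ''
--     acumulado = 0
--
--     for letra in cadena[0:-1]:
--         if acumulado <= cantidad_reemplazos:
--             acumulado +=1
--             nueva_cadena += letra + caracter
--         else:
--             nueva_cadena += letra
--
--     nueva_cadena += cadena[-1]
--
--     return nueva_cadena
-- ===== SOURCE B (Python) =====
-- def separar_por_caracter(cadena, caracter, cantidad_reemplazos):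
--     ultimo = cadena[-1]
--     cuerpo = cadena[:-1]
--     m = max(0, min(cantidad_reemplazos + 1, len(cuerpo)))
--     return ''.join(c + caracter for c in cuerpo[:m]) + cuerpo[m:] + ultimo
-- ===== Notes on version B (the rewrite author's own statement) =====
-- stated objective: simpler
-- what changed: Replaces A's running accumulator and per-character if/else with a precomputed clamped cut point m and three concatenated segments (interleaved prefix, plain remainder, last char).
import Mathlib
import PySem

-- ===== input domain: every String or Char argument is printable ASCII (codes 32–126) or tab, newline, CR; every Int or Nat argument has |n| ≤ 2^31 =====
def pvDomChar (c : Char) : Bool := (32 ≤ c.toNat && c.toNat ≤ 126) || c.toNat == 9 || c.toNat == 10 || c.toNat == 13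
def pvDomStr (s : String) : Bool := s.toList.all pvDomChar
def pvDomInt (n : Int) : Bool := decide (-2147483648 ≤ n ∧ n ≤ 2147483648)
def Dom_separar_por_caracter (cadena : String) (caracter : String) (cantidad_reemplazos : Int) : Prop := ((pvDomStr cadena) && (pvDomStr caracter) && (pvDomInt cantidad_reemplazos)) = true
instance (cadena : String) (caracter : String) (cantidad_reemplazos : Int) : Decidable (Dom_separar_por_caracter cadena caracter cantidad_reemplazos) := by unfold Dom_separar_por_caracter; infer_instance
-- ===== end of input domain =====

-- B replaces A's running accumulator and per-character branch by a precomputed clamped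
-- cut point m and three plain segments (objective: simpler).

-- ===== PORT A =====
-- the for-loop of A: state = (acumulado, nueva_cadena)
def sepALoop (cant : Int) (car : List Char) : List Char → Int → List Char → List Char
  | [], _, acc => acc
  | letra :: rest, acum, acc =>
    if acum ≤ cant then sepALoop cant car rest (acum + 1) (acc ++ ([letra] ++ car))
    else sepALoop cant car rest acum (acc ++ [letra])

def separar_por_caracter (cadena : String) (caracter : String) (cantidad_reemplazos : Int) : String :=
  match PySem.Str.pyGet? cadena (-1) with
  | none => ""   -- Python raises IndexError here (cadena[-1] on empty); excluded by Pre_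
  | some last =>
    String.ofList (sepALoop cantidad_reemplazos caracter.toList
        (PySem.Str.slice cadena (some 0) (some (-1))).toList 0 [] ++ [last])

-- ===== PORT B =====
def separar_por_caracter_alt (cadena : String) (caracter : String) (cantidad_reemplazos : Int) : String :=
  match PySem.Str.pyGet? cadena (-1) with
  | none => ""   -- cadena[-1] raises IndexError in B too; excluded by Pre_
  | some ultimo =>
    let cuerpo := (PySem.Str.slice cadena none (some (-1))).toList
    let m := (max 0 (min (cantidad_reemplazos + 1) (cuerpo.length : Int))).toNat
    String.ofList ((cuerpo.take m).flatMap (fun c => c :: caracter.toList) ++ cuerpo.drop m ++ [ultimo])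

-- ===== PRECONDITION & SPEC =====
-- Pre_ excludes only the empty string, on which Python A (and B) raise IndexError at cadena[-1].
def Pre_separar_por_caracter (cadena : String) (caracter : String) (cantidad_reemplazos : Int) : Prop := cadena.toList ≠ []
instance (cadena : String) (caracter : String) (cantidad_reemplazos : Int) : Decidable (Pre_separar_por_caracter cadena caracter cantidad_reemplazos) := by unfold Pre_separar_por_caracter; infer_instance

def pvWitness_separar_por_caracter : String × String × Int := ("hola", "-", 2)

def Spec_separar_por_caracter (cadena : String) (caracter : String) (cantidad_reemplazos : Int) (out : String) : Prop := out = separar_por_caracter_alt cadena caracter cantidad_reemplazos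
instance (cadena : String) (caracter : String) (cantidad_reemplazos : Int) (out : String) : Decidable (Spec_separar_por_caracter cadena caracter cantidad_reemplazos out) := by unfold Spec_separar_por_caracter; infer_instance

-- ===== CLAIM (what is proved, stated in full; the proofs are below) =====
def Claim_equal_separar_por_caracter : Prop := ∀ (cadena : String) (caracter : String) (cantidad_reemplazos : Int), Dom_separar_por_caracter cadena caracter cantidad_reemplazos → Pre_separar_por_caracter cadena caracter cantidad_reemplazos → Spec_separar_por_caracter cadena caracter cantidad_reemplazos (separar_por_caracter cadena caracter cantidad_reemplazos)

-- ===== LEMMAS AND PROOFS =====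

-- A's loop from state (acum, acc) produces acc, then the first m body characters each
-- followed by the separator, then the rest of the body, with m the clamped cut point.
lemma sepALoop_eq (cant : Int) (car : List Char) (body : List Char) :
    ∀ (acum : Int) (acc : List Char),
    sepALoop cant car body acum acc =
      acc ++ (body.take (max 0 (min (cant - acum + 1) (body.length : Int))).toNat).flatMap
               (fun c => c :: car)
          ++ body.drop (max 0 (min (cant - acum + 1) (body.length : Int))).toNat := by
  induction body with
  | nil => intro acum acc; simp [sepALoop]
  | cons l rest ih =>
    intro acum acc
    by_cases h : acum ≤ cant
    · have hm : (max 0 (min (cant - acum + 1) ((l :: rest).length : Int))).toNat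
          = (max 0 (min (cant - (acum + 1) + 1) ((rest.length : Int)))).toNat + 1 := by
        simp only [List.length_cons]; push_cast; omega
      simp only [sepALoop, if_pos h, ih (acum + 1), hm, List.take_succ_cons,
        List.drop_succ_cons, List.flatMap_cons]
      simp
    · have hm : (max 0 (min (cant - acum + 1) ((l :: rest).length : Int))).toNat = 0 := by
        simp only [List.length_cons]; push_cast; omega
      have hm' : (max 0 (min (cant - acum + 1) ((rest.length : Int)))).toNat = 0 := by
        push_cast; omega
      simp only [sepALoop, if_neg h, ih acum, hm, hm', List.take_zero, List.drop_zero,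
        List.flatMap_nil]
      simp

-- ===== VERDICT (by name: the statement is the Claim_ definition above) =====
theorem separar_por_caracter_spec : Claim_equal_separar_por_caracter := by
  intro cadena caracter cant _ hpre
  unfold Spec_separar_por_caracter separar_por_caracter separar_por_caracter_alt
  have hlast : PySem.Str.pyGet? cadena (-1) = cadena.toList.getLast? := by
    simp [PySem.Str.pyGet?, PySem.List.pyGet?_neg_one]
  obtain ⟨c, hc⟩ : ∃ c, cadena.toList.getLast? = some c :=
    Option.isSome_iff_exists.mp (List.getLast?_isSome.mpr hpre)
  rw [hlast, hc]
  have hsl : (PySem.Str.slice cadena (some 0) (some (-1))).toList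
      = (PySem.Str.slice cadena none (some (-1))).toList := by
    simp [pysem]
  rw [hsl, sepALoop_eq]
  have : cant - 0 + 1 = cant + 1 := by omega
  rw [this]
  simp
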